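-- pv_equiv track=rewrite | github.com/LouisGobert/dev | Leetcode/python/Array/TODO: 218. The Skyline Problem.py | construct_final_array
-- ===== SOURCE A (Python) =====
-- from typing import List, Tuple
--
-- def construct_final_array(array: list[int]) -> List[List[int]]:
--     final_array = []
--     last_value = 0
--     for x, arr in enumerate(array):
--         if last_value != arr:
--             final_array.append([x, arr])
--             last_value = arr
--
--     return final_array
-- ===== SOURCE B (Python) =====
-- from itertools import groupby
--
-- def construct_final_array(array):
--     final = []
--     start = 0
--     prev = 0
--     for value, group in groupby(array):
--         length = sum(1 for _ in group)
--         if value != prev: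
--             final.append([start, value])
--             prev = value
--         start += length
--     return final
-- ===== Notes on version B (the rewrite author's own statement) =====
-- stated objective: idiomatic
-- what changed: B collapses the input into runs of equal values with itertools.groupby and iterates runs (advancing a cumulative start index by each run length), instead of A's per-element scan carrying last_value.
import Mathlib
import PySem

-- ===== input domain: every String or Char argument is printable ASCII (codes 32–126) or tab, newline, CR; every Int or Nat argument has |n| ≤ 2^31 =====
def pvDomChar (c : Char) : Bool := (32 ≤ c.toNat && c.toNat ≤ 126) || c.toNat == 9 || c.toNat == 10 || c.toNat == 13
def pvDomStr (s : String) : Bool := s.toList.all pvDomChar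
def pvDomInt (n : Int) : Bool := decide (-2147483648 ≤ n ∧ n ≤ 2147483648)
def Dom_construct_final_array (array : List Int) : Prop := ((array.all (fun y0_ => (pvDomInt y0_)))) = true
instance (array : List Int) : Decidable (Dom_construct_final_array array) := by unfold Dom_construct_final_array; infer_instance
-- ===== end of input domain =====

-- B replaces A's per-element scan with a run-length (groupby) decomposition: iterate runs of
-- equal values, advancing a cumulative start index by each run length (idiomatic, same cost).


-- ===== PORT A =====
-- A's for loop over enumerate(array), carrying last_value and the accumulator.
def pvLoopA : List Int → Int → Int → List (List Int) → List (List Int)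
  | [], _, _, acc => acc
  | a :: rest, x, last, acc =>
    if last ≠ a then pvLoopA rest (x + 1) a (acc ++ [[x, a]])
    else pvLoopA rest (x + 1) last acc

def construct_final_array (array : List Int) : List (List Int) :=
  pvLoopA array 0 0 []

-- ===== PORT B =====
-- itertools.groupby(array): list of (value, run length) for maximal runs of equal values.
def pvRuns : List Int → List (Int × Nat)
  | [] => []
  | x :: xs =>
    match pvRuns xs with
    | (y, n) :: rest => if y = x then (x, n + 1) :: rest else (x, 1) :: (y, n) :: rest
    | [] => [(x, 1)]

-- B's for loop over the runs, carrying start index and prev.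
def pvBuildB : List (Int × Nat) → Int → Int → List (List Int)
  | [], _, _ => []
  | (v, len) :: rest, start, prev =>
    (if v ≠ prev then [[start, v]] else []) ++ pvBuildB rest (start + (len : Int)) v

def construct_final_array_alt (array : List Int) : List (List Int) :=
  pvBuildB (pvRuns array) 0 0

-- ===== PRECONDITION & SPEC =====
def Spec_construct_final_array (array : List Int) (out : List (List Int)) : Prop := out = construct_final_array_alt array
instance (array : List Int) (out : List (List Int)) : Decidable (Spec_construct_final_array array out) := by unfold Spec_construct_final_array; infer_instance

-- ===== CLAIM (what is proved, stated in full; the proofs are below) =====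
def Claim_equal_construct_final_array : Prop := ∀ (array : List Int), Dom_construct_final_array array → Spec_construct_final_array array (construct_final_array array)

-- ===== LEMMAS AND PROOFS =====

-- One cons step on the B side equals one element step of A's scan.
theorem pvBuildB_runs_cons (x : Int) (xs : List Int) (start prev : Int) :
    pvBuildB (pvRuns (x :: xs)) start prev =
      (if x ≠ prev then [[start, x]] else []) ++ pvBuildB (pvRuns xs) (start + 1) x := by
  cases h : pvRuns xs with
  | nil => simp [pvRuns, h, pvBuildB]
  | cons p rest =>
    obtain ⟨y, n⟩ := p
    by_cases hy : y = x
    · subst hy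
      have hruns : pvRuns (y :: xs) = (y, n + 1) :: rest := by simp [pvRuns, h]
      rw [hruns]
      show (if y ≠ prev then [[start, y]] else []) ++
          pvBuildB rest (start + ((n + 1 : Nat) : Int)) y = _
      have harith : start + ((n + 1 : Nat) : Int) = start + 1 + (n : Int) := by push_cast; ring
      rw [harith]
      congr 1
      simp [pvBuildB]
    · have hruns : pvRuns (x :: xs) = (x, 1) :: (y, n) :: rest := by simp [pvRuns, h, hy]
      rw [hruns]
      show (if x ≠ prev then [[start, x]] else []) ++
          pvBuildB ((y, n) :: rest) (start + ((1 : Nat) : Int)) x = _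
      norm_num

theorem pvLoopA_eq_buildB (l : List Int) (idx prev : Int) (acc : List (List Int)) :
    pvLoopA l idx prev acc = acc ++ pvBuildB (pvRuns l) idx prev := by
  induction l generalizing idx prev acc with
  | nil => simp [pvLoopA, pvRuns, pvBuildB]
  | cons x xs ih =>
    rw [pvBuildB_runs_cons]
    simp only [pvLoopA]
    by_cases h : prev ≠ x
    · have hx : x ≠ prev := fun hc => h hc.symm
      simp [h, hx, ih]
    · have hp : prev = x := not_not.mp h
      subst hp
      simp [ih]

-- ===== VERDICT (by name: the statement is the Claim_ definition above) =====
theorem construct_final_array_spec : Claim_equal_construct_final_array := by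
  intro array _
  show construct_final_array array = construct_final_array_alt array
  simp [construct_final_array, construct_final_array_alt, pvLoopA_eq_buildB]
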